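-- pv_equiv track=rewrite | github.com/waldiez/py | waldiez/exporting/utils/importing.py | _get_autogen_imports
-- ===== SOURCE A (Python) =====
-- from typing import Dict, List, Optional, Set, Tuple
--
-- def _get_autogen_imports(
--     imports: Set[str],
-- ) -> Tuple[Set[str], Dict[str, List[str]], Set[str]]:
--     """Get the autogen imports."""
--     autogen_imports = set()
--     _autogen_dot_imports: Dict[str, List[str]] = {}
--     remaining_imports: Set[str] = set()
--     for imp in imports:
--         if imp.startswith("from autogen import "):
--             autogen_imports.add(imp)
--         elif imp.startswith("from autogen."):
--             parts = imp.split("from autogen.")[1].split(" import ")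
--             if len(parts) == 2:
--                 package = parts[0]
--                 module = parts[1]
--                 if package not in _autogen_dot_imports:
--                     _autogen_dot_imports[package] = []
--                 _autogen_dot_imports[package].append(module)
--         else:
--             remaining_imports.add(imp)
--     # sort the autogen imports
--     autogen_imports = set(sorted(list(autogen_imports)))
--     autogen_dot_imports = {}
--     # sort the autogen dot imports (both keys and values)
--     sorted_keys = sorted(_autogen_dot_imports.keys())
--     for key in sorted_keys:
--         autogen_dot_imports[key] = sorted(_autogen_dot_imports[key])
--     return autogen_imports, autogen_dot_imports, remaining_imports
-- ===== SOURCE B (Python) =====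
-- from typing import Dict, List, Set, Tuple
--
--
-- def _get_autogen_imports(
--     imports: Set[str],
-- ) -> Tuple[Set[str], Dict[str, List[str]], Set[str]]:
--     """Get the autogen imports (flat pair list instead of an incrementally built dict)."""
--     autogen_imports = set()
--     remaining_imports: Set[str] = set()
--     pairs: List[Tuple[str, str]] = []
--     for imp in imports:
--         if imp.startswith("from autogen import "):
--             autogen_imports.add(imp)
--         elif imp.startswith("from autogen."):
--             parts = imp.split("from autogen.")[1].split(" import ")
--             if len(parts) == 2:
--                 pairs.append((parts[0], parts[1]))
--         else:
--             remaining_imports.add(imp)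
--     autogen_dot_imports = {
--         pkg: sorted(module for p, module in pairs if p == pkg)
--         for pkg in sorted({p for p, _ in pairs})
--     }
--     return set(sorted(autogen_imports)), autogen_dot_imports, remaining_imports
-- ===== Notes on version B (the rewrite author's own statement) =====
-- stated objective: alternative
-- what changed: Instead of incrementally maintaining a dict of module lists during the loop, B collects the autogen-dot imports as a flat (package, module) pair list and builds the output dict afterwards in one comprehension over the sorted distinct packages, sorting each package's filtered module list.
import Mathlib
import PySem

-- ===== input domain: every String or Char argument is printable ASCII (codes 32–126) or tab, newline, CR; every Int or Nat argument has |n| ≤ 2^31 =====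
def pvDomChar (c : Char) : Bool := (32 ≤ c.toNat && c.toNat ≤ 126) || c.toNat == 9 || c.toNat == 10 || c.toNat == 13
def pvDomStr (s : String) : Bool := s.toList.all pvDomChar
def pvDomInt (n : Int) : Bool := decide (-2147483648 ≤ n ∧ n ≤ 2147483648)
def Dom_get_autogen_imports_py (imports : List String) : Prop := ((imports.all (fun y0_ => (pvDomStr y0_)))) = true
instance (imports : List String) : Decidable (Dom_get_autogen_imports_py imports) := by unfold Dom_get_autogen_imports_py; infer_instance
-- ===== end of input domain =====

-- B replaces A's incrementally maintained dict of module lists by a flat (package, module)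
-- pair list grouped after the loop (objective: alternative decomposition, same cost class).


-- ===== PORT A =====
-- loop body of A; the `.getD []` on split? is exact: the separator is a nonempty literal,
-- so Python's split never raises and split? is always `some`.
def pvStepA (st : PySem.Set String × PySem.Dict String (List String) × PySem.Set String)
    (imp : String) : PySem.Set String × PySem.Dict String (List String) × PySem.Set String :=
  if PySem.Str.startswith imp "from autogen import " then
    (PySem.Set.add st.1 imp, st.2.1, st.2.2)
  else if PySem.Str.startswith imp "from autogen." then
    -- imp[1] after split cannot raise under the startswith guard; pyGetD "" is exact here
    let parts := PySem.Str.split?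
        (PySem.List.pyGetD ((PySem.Str.split? imp "from autogen.").getD []) 1 "") " import "
      |>.getD []
    if parts.length = 2 then
      let package := PySem.List.pyGetD parts 0 ""
      let module := PySem.List.pyGetD parts 1 ""
      -- `if package not in d: d[package] = []` then `d[package].append(module)`
      let d := if st.2.1.contains package then st.2.1 else st.2.1.insert package []
      (st.1, d.modify package [] (fun v => v ++ [module]), st.2.2)
    else st
  else (st.1, st.2.1, PySem.Set.add st.2.2 imp)

def get_autogen_imports_py (imports : List String) :
    List String × (List (String × List String)) × List String :=
  let st := imports.foldl pvStepA (PySem.Set.empty, PySem.Dict.empty, PySem.Set.empty)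
  let autogen_imports := PySem.Set.ofList (PySem.List.sorted st.1 (fun x => x) false)
  let sorted_keys := PySem.List.sorted st.2.1.keys (fun x => x) false
  let autogen_dot_imports := sorted_keys.foldl
    (fun ad k => ad.insert k (PySem.List.sorted (st.2.1.getD k []) (fun x => x) false))
    PySem.Dict.empty
  (autogen_imports, autogen_dot_imports.items, st.2.2)

-- ===== PORT B =====
def pvStepB (st : PySem.Set String × List (String × String) × PySem.Set String)
    (imp : String) : PySem.Set String × List (String × String) × PySem.Set String :=
  if PySem.Str.startswith imp "from autogen import " then
    (PySem.Set.add st.1 imp, st.2.1, st.2.2)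
  else if PySem.Str.startswith imp "from autogen." then
    let parts := PySem.Str.split?
        (PySem.List.pyGetD ((PySem.Str.split? imp "from autogen.").getD []) 1 "") " import "
      |>.getD []
    if parts.length = 2 then
      (st.1, st.2.1 ++ [(PySem.List.pyGetD parts 0 "", PySem.List.pyGetD parts 1 "")], st.2.2)
    else st
  else (st.1, st.2.1, PySem.Set.add st.2.2 imp)

def get_autogen_imports_py_alt (imports : List String) :
    List String × (List (String × List String)) × List String :=
  let st := imports.foldl pvStepB (PySem.Set.empty, ([] : List (String × String)), PySem.Set.empty)
  let packages := PySem.List.sorted (PySem.Set.ofList (st.2.1.map (fun p => p.1))) (fun x => x) false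
  let autogen_dot_imports := packages.map (fun pkg =>
    (pkg, PySem.List.sorted ((st.2.1.filter (fun p => p.1 == pkg)).map (fun p => p.2)) (fun x => x) false))
  (PySem.Set.ofList (PySem.List.sorted st.1 (fun x => x) false), autogen_dot_imports, st.2.2)

-- ===== PRECONDITION & SPEC =====
def Spec_get_autogen_imports_py (imports : List String) (out : List String × (List (String × List String)) × List String) : Prop := out = get_autogen_imports_py_alt imports
instance (imports : List String) (out : List String × (List (String × List String)) × List String) : Decidable (Spec_get_autogen_imports_py imports out) := by unfold Spec_get_autogen_imports_py; infer_instance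

-- ===== CLAIM (what is proved, stated in full; the proofs are below) =====
def Claim_equal_get_autogen_imports_py : Prop := ∀ (imports : List String), Dom_get_autogen_imports_py imports → Spec_get_autogen_imports_py imports (get_autogen_imports_py imports)

-- ===== LEMMAS AND PROOFS =====

-- the loop invariant tying A's dict to B's flat pair list
def pvInv (d : PySem.Dict String (List String)) (ps : List (String × String)) : Prop :=
  d.keys = PySem.Set.ofList (ps.map (fun p => p.1)) ∧
  ∀ k, d.getD k [] = (ps.filter (fun p => p.1 == k)).map (fun p => p.2)

theorem pvStep_keys (d : PySem.Dict String (List String)) (pkg m : String) :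
    (((if d.contains pkg then d else d.insert pkg []).modify pkg []
      (fun v => v ++ [m])).keys) = PySem.Set.add d.keys pkg := by
  by_cases h : d.contains pkg = true
  · simp only [h, if_true, PySem.Dict.keys_modify]
    rw [PySem.Dict.keys_insert_of_contains _ _ h,
      PySem.Set.add_of_mem ((PySem.Dict.contains_iff_mem_keys d pkg).1 h)]
  · have h' : d.contains pkg = false := by simpa using h
    simp only [h', Bool.false_eq_true, if_false, PySem.Dict.keys_modify]
    rw [PySem.Dict.keys_insert_of_contains _ _ (by simp [PySem.Dict.contains_insert_self]),
      PySem.Dict.keys_insert_of_not_contains _ _ h',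
      PySem.Set.add_of_not_mem (by
        intro hm
        exact absurd ((PySem.Dict.contains_iff_mem_keys d pkg).2 hm) (by simp [h']))]

theorem pvStep_getD (d : PySem.Dict String (List String)) (pkg m k : String) :
    (((if d.contains pkg then d else d.insert pkg []).modify pkg []
      (fun v => v ++ [m])).getD k []) =
      if k = pkg then d.getD pkg [] ++ [m] else d.getD k [] := by
  by_cases h : d.contains pkg = true
  · simp only [h, if_true, PySem.Dict.getD_modify]
  · have h' : d.contains pkg = false := by simpa using h
    simp only [h', Bool.false_eq_true, if_false, PySem.Dict.getD_modify]
    by_cases hk : k = pkg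
    · simp [hk, PySem.Dict.getD_of_not_contains d [] h']
    · simp [hk, PySem.Dict.getD_insert]

theorem pvLoop_rel (imports : List String) (s1 s2 : PySem.Set String)
    (d : PySem.Dict String (List String)) (ps : List (String × String))
    (hinv : pvInv d ps) :
    (imports.foldl pvStepA (s1, d, s2)).1 = (imports.foldl pvStepB (s1, ps, s2)).1 ∧
    (imports.foldl pvStepA (s1, d, s2)).2.2 = (imports.foldl pvStepB (s1, ps, s2)).2.2 ∧
    pvInv (imports.foldl pvStepA (s1, d, s2)).2.1 (imports.foldl pvStepB (s1, ps, s2)).2.1 := by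
  induction imports generalizing s1 s2 d ps with
  | nil => exact ⟨rfl, rfl, hinv⟩
  | cons imp rest ih =>
    simp only [List.foldl_cons]
    by_cases h1 : PySem.Str.startswith imp "from autogen import " = true
    · simp only [pvStepA, pvStepB, h1, if_true]
      exact ih _ _ _ _ hinv
    · by_cases h2 : PySem.Str.startswith imp "from autogen." = true
      · simp only [pvStepA, pvStepB, h1, h2, Bool.not_eq_true] at *
        simp only [Bool.false_eq_true, if_false]
        set parts := (PySem.Str.split?
          (PySem.List.pyGetD ((PySem.Str.split? imp "from autogen.").getD []) 1 "")
          " import ").getD [] with hparts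
        by_cases h3 : parts.length = 2
        · simp only [h3, if_true]
          refine ih _ _ _ _ ⟨?_, ?_⟩
          · rw [pvStep_keys, hinv.1]
            simp [PySem.Set.ofList_append_singleton]
          · intro k
            rw [pvStep_getD, List.filter_append, List.map_append, hinv.2 k]
            by_cases hk : k = PySem.List.pyGetD parts 0 ""
            · simp [hk, hinv.2]
            · simp [hk, Ne.symm hk]
        · simp only [h3, if_false]
          exact ih _ _ _ _ hinv
      · simp only [pvStepA, pvStepB, h1, h2, Bool.not_eq_true] at *
        simp only [Bool.false_eq_true, if_false]
        exact ih _ _ _ _ hinv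

-- ===== VERDICT (by name: the statement is the Claim_ definition above) =====
theorem get_autogen_imports_py_spec : Claim_equal_get_autogen_imports_py := by
  intro imports _
  unfold Spec_get_autogen_imports_py get_autogen_imports_py get_autogen_imports_py_alt
  obtain ⟨h1, h2, hk, hg⟩ := pvLoop_rel imports PySem.Set.empty PySem.Set.empty
    PySem.Dict.empty []
    ⟨by simp [PySem.Dict.keys_empty, PySem.Set.ofList], fun k => by simp [PySem.Dict.getD_empty]⟩
  set stA := imports.foldl pvStepA (PySem.Set.empty, PySem.Dict.empty, PySem.Set.empty) with hA
  set stB := imports.foldl pvStepB (PySem.Set.empty, [], PySem.Set.empty) with hB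
  dsimp only
  refine Prod.ext (by rw [h1]) (Prod.ext ?_ h2)
  have hnodup : (PySem.List.sorted stA.2.1.keys (fun x => x) false).Nodup := by
    have := PySem.List.sorted_perm stA.2.1.keys (fun x => x) false
    exact this.nodup_iff.2 (hk ▸ PySem.Set.nodup_ofList _)
  rw [PySem.Dict.items_foldl_insert_fresh _ (fun k => k) _ _
    (fun a _ => PySem.Dict.contains_empty a) (by simpa using hnodup)]
  rw [show (PySem.Dict.empty : PySem.Dict String (List String)).items = [] from rfl]
  simp only [List.nil_append, hk]
  exact List.map_congr_left (fun k _ => by rw [hg k])
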